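-- pv_equiv track=rewrite | github.com/YOUSOYOUSO/ZsxqCrawler | modules/analyzers/sector_heat.py | match_sector_keywords
-- ===== SOURCE A (Python) =====
-- from typing import Any, Dict, Iterable, List, Optional, Sequence, Tuple
--
-- def match_sector_keywords(
--     text: str,
--     sector_keywords: Dict[str, Sequence[str]],
-- ) -> Dict[str, List[str]]:
--     """返回文本命中的板块及其关键词列表。"""
--     text_lower = (text or "").lower()
--     if not text_lower:
--         return {}
--
--     hits: Dict[str, List[str]] = {}
--     for sector, keywords in sector_keywords.items():
--         matched = [kw for kw in keywords if kw in text_lower]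
--         if matched:
--             hits[sector] = matched
--     return hits
-- ===== SOURCE B (Python) =====
-- def match_sector_keywords(text, sector_keywords):
--     """返回文本命中的板块及其关键词列表。"""
--     text_lower = (text or "").lower()
--     if not text_lower:
--         return {}
--     # Text-driven matching: enumerate every substring of the text up to the
--     # longest keyword length once into a hash set, then each keyword test is a
--     # single O(1)-expected set lookup instead of a scan of the text.
--     max_len = max((len(kw) for kws in sector_keywords.values() for kw in kws), default=0)
--     n = len(text_lower)
--     subs = {""} | {text_lower[i:j] for i in range(n) for j in range(i + 1, min(i + max_len, n) + 1)}
--     hits = {}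
--     for sector, keywords in sector_keywords.items():
--         matched = [kw for kw in keywords if kw in subs]
--         if matched:
--             hits[sector] = matched
--     return hits
-- ===== Notes on version B (the rewrite author's own statement) =====
-- stated objective: faster
-- what changed: B is text-driven instead of keyword-driven: it enumerates every substring of the text up to the longest keyword length once into a hash set, so each keyword test becomes a single O(1)-expected set lookup instead of a substring scan of the whole text.
import Mathlib
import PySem

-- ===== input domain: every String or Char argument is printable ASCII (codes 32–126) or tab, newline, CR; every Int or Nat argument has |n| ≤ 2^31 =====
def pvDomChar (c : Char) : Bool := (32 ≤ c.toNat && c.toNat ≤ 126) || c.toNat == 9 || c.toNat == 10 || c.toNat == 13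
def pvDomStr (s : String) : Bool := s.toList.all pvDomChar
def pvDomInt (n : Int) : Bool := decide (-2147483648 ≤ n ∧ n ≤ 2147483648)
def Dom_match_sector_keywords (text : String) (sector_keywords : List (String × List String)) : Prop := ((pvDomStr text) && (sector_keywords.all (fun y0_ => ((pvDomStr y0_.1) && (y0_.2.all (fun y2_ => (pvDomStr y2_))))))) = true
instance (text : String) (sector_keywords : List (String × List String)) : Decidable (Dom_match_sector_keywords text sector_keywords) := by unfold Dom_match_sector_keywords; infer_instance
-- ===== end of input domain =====

-- B replaces A's per-keyword scan of the text by a text-driven pass: it collects every substring of the text up to the longest keyword length into a hash set once, then filters each sector's keywords by set lookup (alternative algorithm; same result).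


-- ===== PORT A =====
-- 'hits[sector] = matched' appends a fresh key (the keys come from a Python dict, hence distinct), ported as list append.
def match_sector_keywords (text : String) (sector_keywords : List (String × List String)) : List (String × List String) :=
  let text_lower := PySem.Str.lower text
  if PySem.Str.len text_lower == 0 then []
  else
    sector_keywords.foldl (fun hits p =>
      let matched := p.2.filter (fun kw => PySem.Str.isIn kw text_lower)
      if matched.isEmpty then hits else hits ++ [(p.1, matched)]) []

-- ===== PORT B =====
-- 'for kws in d.values(): for kw in kws: max_len = max(max_len, len(kw))'
def pvMaxLen (sector_keywords : List (String × List String)) : Int :=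
  sector_keywords.foldl (fun m p => p.2.foldl (fun m kw => max m (PySem.Str.len kw)) m) 0

-- the set comprehension {text_lower[i:j] for i in range(n) for j in range(i+1, min(i+max_len, n)+1)}
def pvSubs (tl : String) (max_len : Int) : PySem.Set String :=
  PySem.Set.union (PySem.Set.ofList [""])
    ((PySem.List.pyRange 0 (PySem.Str.len tl)).flatMap (fun i =>
      (PySem.List.pyRange (i + 1) (min (i + max_len) (PySem.Str.len tl) + 1)).map (fun j =>
        PySem.Str.slice tl (some i) (some j))))

def match_sector_keywords_alt (text : String) (sector_keywords : List (String × List String)) : List (String × List String) :=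
  let text_lower := PySem.Str.lower text
  if PySem.Str.len text_lower == 0 then []
  else
    let max_len := pvMaxLen sector_keywords
    let subs := pvSubs text_lower max_len
    sector_keywords.foldl (fun hits p =>
      let matched := p.2.filter (fun kw => PySem.Set.contains subs kw)
      if matched.isEmpty then hits else hits ++ [(p.1, matched)]) []

-- ===== PRECONDITION & SPEC =====
def Spec_match_sector_keywords (text : String) (sector_keywords : List (String × List String)) (out : List (String × List String)) : Prop := out = match_sector_keywords_alt text sector_keywords
instance (text : String) (sector_keywords : List (String × List String)) (out : List (String × List String)) : Decidable (Spec_match_sector_keywords text sector_keywords out) := by unfold Spec_match_sector_keywords; infer_instance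

-- ===== CLAIM (what is proved, stated in full; the proofs are below) =====
def Claim_equal_match_sector_keywords : Prop := ∀ (text : String) (sector_keywords : List (String × List String)), Dom_match_sector_keywords text sector_keywords → Spec_match_sector_keywords text sector_keywords (match_sector_keywords text sector_keywords)

-- ===== LEMMAS AND PROOFS =====

-- every keyword occurring in the table has length ≤ pvMaxLen
theorem pvMaxLen_bound (sks : List (String × List String)) (p : String × List String) (kw : String)
    (hp : p ∈ sks) (hkw : kw ∈ p.2) : PySem.Str.len kw ≤ pvMaxLen sks := by
  unfold pvMaxLen
  have hgen : ∀ (l : List (String × List String)) (m : Int),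
      (m ≤ l.foldl (fun m p => p.2.foldl (fun m kw => max m (PySem.Str.len kw)) m) m) ∧
      (p ∈ l → PySem.Str.len kw ≤ l.foldl (fun m p => p.2.foldl (fun m kw => max m (PySem.Str.len kw)) m) m) := by
    intro l
    induction l with
    | nil => exact fun m => ⟨le_refl m, fun h => absurd h (List.not_mem_nil)⟩
    | cons q t ih =>
      intro m
      simp only [List.foldl_cons]
      have hinner := PySem.List.le_foldl_max_int q.2 PySem.Str.len m
      constructor
      · exact le_trans hinner.1 (ih _).1
      · intro hpl
        rcases List.mem_cons.mp hpl with h | h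
        · subst h
          exact le_trans (hinner.2 kw hkw) (ih _).1
        · exact (ih _).2 h
  exact (hgen sks 0).2 hp

-- membership in the substring set is exactly Python's 'kw in text_lower' for keywords within the length bound
theorem pvSubs_mem (tl kw : String) (max_len : Int)
    (hlen : PySem.Str.len kw ≤ max_len) :
    kw ∈ pvSubs tl max_len ↔ PySem.Str.isIn kw tl = true := by
  unfold pvSubs
  rw [PySem.Set.mem_union, PySem.Set.mem_ofList]
  constructor
  · rintro (hk | hk)
    · have : kw = "" := by simpa using hk
      subst this
      rw [PySem.Str.isIn_eq]
      simp [PySem.Chars.isIn_nil tl.toList]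
    · rw [List.mem_flatMap] at hk
      obtain ⟨i, hi, hk⟩ := hk
      rw [List.mem_map] at hk
      obtain ⟨j, hj, hk⟩ := hk
      rw [PySem.List.mem_pyRange_one] at hi hj
      subst hk
      rw [PySem.Str.isIn_eq, ← PySem.Chars.exists_prefix_drop_iff_isIn]
      refine ⟨i.toNat, ?_⟩
      have h0j : 0 ≤ j := by omega
      rw [PySem.Str.toList_slice, PySem.Chars.slice_eq_listSlice,
        PySem.List.slice_toNat _ hi.1 h0j]
      exact List.take_prefix _ _
  · intro hin
    by_cases hk0 : kw.toList = []
    · exact Or.inl (by simp [String.toList_eq_nil_iff.mp hk0])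
    · refine Or.inr ?_
      rw [PySem.Str.isIn_eq, ← PySem.Chars.exists_prefix_drop_iff_isIn] at hin
      obtain ⟨j0, hpre⟩ := hin
      have hL : 0 < kw.toList.length := List.length_pos_iff.mpr hk0
      have hle : kw.toList.length ≤ tl.toList.length - j0 := by
        simpa [List.length_drop] using hpre.length_le
      have hj0 : j0 < tl.toList.length := by omega
      rw [PySem.Str.len_eq] at hlen
      rw [List.mem_flatMap]
      refine ⟨(j0 : Int), ?_, List.mem_map.mpr ⟨(j0 : Int) + (kw.toList.length : Int), ?_, ?_⟩⟩
      · rw [PySem.List.mem_pyRange_one, PySem.Str.len_eq]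
        omega
      · rw [PySem.List.mem_pyRange_one, PySem.Str.len_eq]
        omega
      · apply String.toList_inj.mp
        have h0 : (0 : Int) ≤ (j0 : Int) := Int.natCast_nonneg j0
        have h1 : (0 : Int) ≤ (j0 : Int) + (kw.toList.length : Int) := by omega
        rw [PySem.Str.toList_slice, PySem.Chars.slice_eq_listSlice,
          PySem.List.slice_toNat _ h0 h1]
        have htn : ((j0 : Int) + (kw.toList.length : Int)).toNat - (j0 : Int).toNat
            = kw.toList.length := by omega
        rw [htn, Int.toNat_natCast]
        exact (List.prefix_iff_eq_take.mp hpre).symm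

theorem pvSubs_contains (tl kw : String) (max_len : Int)
    (hlen : PySem.Str.len kw ≤ max_len) :
    PySem.Set.contains (pvSubs tl max_len) kw = PySem.Str.isIn kw tl := by
  have h := pvSubs_mem tl kw max_len hlen
  rw [← PySem.Set.contains_iff] at h
  cases hc : PySem.Str.isIn kw tl
  · cases hc' : PySem.Set.contains (pvSubs tl max_len) kw
    · rfl
    · rw [hc' ] at h; rw [h.mp rfl] at hc; exact absurd hc (by simp)
  · exact h.mpr hc

-- ===== VERDICT (by name: the statement is the Claim_ definition above) =====
theorem match_sector_keywords_spec : Claim_equal_match_sector_keywords := by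
  intro text sks _
  unfold Spec_match_sector_keywords match_sector_keywords match_sector_keywords_alt
  simp only []
  split
  · rfl
  · rename_i hne
    apply PySem.List.foldl_congr_mem
    intro hits p hp
    have hfilter : p.2.filter (fun kw => PySem.Str.isIn kw (PySem.Str.lower text))
        = p.2.filter (fun kw => PySem.Set.contains (pvSubs (PySem.Str.lower text) (pvMaxLen sks)) kw) := by
      apply List.filter_congr
      intro kw hkw
      exact (pvSubs_contains (PySem.Str.lower text) kw (pvMaxLen sks)
        (pvMaxLen_bound sks p kw hp hkw)).symm
    rw [hfilter]
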